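-- pv_equiv track=rewrite | github.com/SonyCSLParis/Plant3DImager | targeting/modules/robot_controller.py | _segment_path_by_actions
-- ===== SOURCE A (Python) =====
-- def _segment_path_by_actions(path):
--     """Segment trajectory by action points (photo/fluoro)"""
--     segments = []
--     action_indices = []
--
--     # Find action indices
--     for i, point_info in enumerate(path):
--         if point_info["type"] in ["photo_point", "fluoro_point"]:
--             action_indices.append(i)
--
--     if not action_indices:
--         return [path]
--
--     # Create segments
--     start_idx = 0
--
--     for action_idx in action_indices:
--         # Segment from start to action (inclusive)
--         segment = path[start_idx:action_idx + 1]
--         segments.append(segment)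
--         start_idx = action_idx
--
--     # Final segment from last action to end
--     if start_idx < len(path) - 1:
--         final_segment = path[start_idx:]
--         segments.append(final_segment)
--
--     return segments
-- ===== SOURCE B (Python) =====
-- def _segment_path_by_actions(path):
--     """Segment trajectory by action points (photo/fluoro) - single pass."""
--     segments = []
--     current = []
--     found_action = False
--     for point in path:
--         current.append(point)
--         if point["type"] in ("photo_point", "fluoro_point"):
--             segments.append(current)
--             current = [point]
--             found_action = True
--     if not found_action:
--         return [path]
--     if len(current) > 1:
--         segments.append(current)
--     return segments
-- ===== Notes on version B (the rewrite author's own statement) =====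
-- stated objective: alternative
-- what changed: Replaces the two-pass scheme (collect action indices, then slice the path at each index) with a single pass that grows a current segment, closes it at each action point and reseeds it with that point.
import Mathlib
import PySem

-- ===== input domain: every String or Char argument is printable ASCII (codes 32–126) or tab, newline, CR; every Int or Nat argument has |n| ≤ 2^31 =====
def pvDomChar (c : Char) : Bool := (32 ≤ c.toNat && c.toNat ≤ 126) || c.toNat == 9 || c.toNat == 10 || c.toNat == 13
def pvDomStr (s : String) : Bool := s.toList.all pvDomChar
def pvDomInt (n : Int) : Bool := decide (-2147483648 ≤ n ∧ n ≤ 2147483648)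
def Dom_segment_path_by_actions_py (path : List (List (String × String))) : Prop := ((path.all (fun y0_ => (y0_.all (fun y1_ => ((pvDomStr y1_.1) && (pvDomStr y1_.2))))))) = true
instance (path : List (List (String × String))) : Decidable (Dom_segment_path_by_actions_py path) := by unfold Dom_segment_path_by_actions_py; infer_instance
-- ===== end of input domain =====

-- B replaces A's two passes (collect action indices, then slice) by one pass that grows the
-- current segment and closes/reseeds it at each action point; alternative decomposition, same cost.

-- point_info["type"] in ["photo_point", "fluoro_point"]  (shared by both ports)
def pvIsAct (p : List (String × String)) : Bool :=
  ["photo_point", "fluoro_point"].contains (PySem.Dict.getD (PySem.Dict.mk p) "type" "")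

-- ===== PORT A =====
def segment_path_by_actions_py (path : List (List (String × String))) : List (List (List (String × String))) :=
  let action_indices : List Int :=
    (PySem.List.enumerate path).foldl
      (fun acc ip => if pvIsAct ip.2 then acc ++ [ip.1] else acc) []
  if action_indices = [] then [path]
  else
    let st :=
      action_indices.foldl
        (fun (st : List (List (List (String × String))) × Int) a =>
          (st.1 ++ [PySem.List.slice path (some st.2) (some (a + 1))], a)) ([], 0)
    if st.2 < (path.length : Int) - 1 then
      st.1 ++ [PySem.List.slice path (some st.2) none]
    else st.1

-- ===== PORT B =====
def segment_path_by_actions_py_alt (path : List (List (String × String))) : List (List (List (String × String))) :=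
  let st :=
    path.foldl
      (fun (st : List (List (List (String × String))) × List (List (String × String)) × Bool) point =>
        let current := st.2.1 ++ [point]
        if pvIsAct point then (st.1 ++ [current], [point], true)
        else (st.1, current, st.2.2))
      ([], [], false)
  if st.2.2 = false then [path]
  else if st.2.1.length > 1 then st.1 ++ [st.2.1] else st.1

-- ===== PRECONDITION & SPEC =====
-- Pre_ excludes points missing the "type" key, on which Python A raises KeyError.
def Pre_segment_path_by_actions_py (path : List (List (String × String))) : Prop :=
  path.all (fun p => ((PySem.Dict.mk p).get? "type").isSome) = true
instance (path : List (List (String × String))) : Decidable (Pre_segment_path_by_actions_py path) := by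
  unfold Pre_segment_path_by_actions_py; infer_instance
def pvWitness_segment_path_by_actions_py : (List (List (String × String))) :=
  [[("type", "move_point"), ("x", "1")], [("type", "photo_point")], [("type", "move_point")]]
def Spec_segment_path_by_actions_py (path : List (List (String × String))) (out : List (List (List (String × String)))) : Prop := out = segment_path_by_actions_py_alt path
instance (path : List (List (String × String))) (out : List (List (List (String × String)))) : Decidable (Spec_segment_path_by_actions_py path out) := by unfold Spec_segment_path_by_actions_py; infer_instance

-- ===== CLAIM (what is proved, stated in full; the proofs are below) =====
def Claim_equal_segment_path_by_actions_py : Prop := ∀ (path : List (List (String × String))), Dom_segment_path_by_actions_py path → Pre_segment_path_by_actions_py path → Spec_segment_path_by_actions_py path (segment_path_by_actions_py path)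

-- ===== LEMMAS AND PROOFS =====

-- action indices of a suffix, first index s (A's first loop, as a recursion)
def pvIdx {α : Type} (c : α → Bool) : Int → List α → List Int
  | _, [] => []
  | s, p :: ps => (if c p then [s] else []) ++ pvIdx c (s + 1) ps

-- A's second loop plus its final-segment guard, as a recursion over the index list
def pvSegs {α : Type} (path : List α) : Int → List Int → List (List α)
  | start, [] =>
      if start < (path.length : Int) - 1 then [PySem.List.slice path (some start) none] else []
  | start, a :: rest =>
      PySem.List.slice path (some start) (some (a + 1)) :: pvSegs path a rest

-- B's loop plus its trailing-segment guard, as a recursion over the remaining points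
def pvGo {α : Type} (c : α → Bool) : List α → List α → List (List α)
  | cur, [] => if cur.length > 1 then [cur] else []
  | cur, p :: ps => if c p then (cur ++ [p]) :: pvGo c [p] ps else pvGo c (cur ++ [p]) ps

theorem pvIdx_fold {α : Type} (c : α → Bool) :
    ∀ (l : List α) (s : Int) (acc : List Int),
      (PySem.List.enumerate l s).foldl (fun acc ip => if c ip.2 then acc ++ [ip.1] else acc) acc
        = acc ++ pvIdx c s l := by
  intro l
  induction l with
  | nil => intro s acc; simp [PySem.List.enumerate_nil, pvIdx]
  | cons p ps ih =>
      intro s acc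
      simp only [PySem.List.enumerate_cons, List.foldl_cons, ih, pvIdx]
      by_cases h : c p <;> simp [h]

theorem pvIdx_nil_iff {α : Type} (c : α → Bool) :
    ∀ (l : List α) (s : Int), pvIdx c s l = [] ↔ l.any c = false := by
  intro l
  induction l with
  | nil => intro s; simp [pvIdx]
  | cons p ps ih =>
      intro s
      by_cases h : c p <;> simp [pvIdx, h, ih]

theorem pvSegs_fold {α : Type} (path : List α) :
    ∀ (idxs : List Int) (segs : List (List α)) (start : Int),
      (idxs.foldl
          (fun (st : List (List α) × Int) a =>
            (st.1 ++ [PySem.List.slice path (some st.2) (some (a + 1))], a)) (segs, start)).1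
        ++ (if (idxs.foldl
              (fun (st : List (List α) × Int) a =>
                (st.1 ++ [PySem.List.slice path (some st.2) (some (a + 1))], a)) (segs, start)).2
              < (path.length : Int) - 1
            then [PySem.List.slice path
              (some (idxs.foldl
                (fun (st : List (List α) × Int) a =>
                  (st.1 ++ [PySem.List.slice path (some st.2) (some (a + 1))], a)) (segs, start)).2) none]
            else [])
        = segs ++ pvSegs path start idxs := by
  intro idxs
  induction idxs with
  | nil => intro segs start; rfl
  | cons a rest ih =>
      intro segs start
      simp only [List.foldl_cons, pvSegs, ih, List.append_assoc, List.cons_append,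
        List.nil_append]

theorem pvGo_fold {α : Type} (c : α → Bool) :
    ∀ (l : List α) (segs : List (List α)) (cur : List α) (f : Bool),
      ((l.foldl
          (fun (st : List (List α) × List α × Bool) point =>
            if c point then (st.1 ++ [st.2.1 ++ [point]], [point], true)
            else (st.1, st.2.1 ++ [point], st.2.2))
          (segs, cur, f)).1
        ++ (if (l.foldl
              (fun (st : List (List α) × List α × Bool) point =>
                let current := st.2.1 ++ [point]
                if c point then (st.1 ++ [current], [point], true) else (st.1, current, st.2.2))
              (segs, cur, f)).2.1.length > 1
            then [(l.foldl
              (fun (st : List (List α) × List α × Bool) point =>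
                let current := st.2.1 ++ [point]
                if c point then (st.1 ++ [current], [point], true) else (st.1, current, st.2.2))
              (segs, cur, f)).2.1]
            else [])
        = segs ++ pvGo c cur l)
      ∧ (l.foldl
          (fun (st : List (List α) × List α × Bool) point =>
            if c point then (st.1 ++ [st.2.1 ++ [point]], [point], true)
            else (st.1, st.2.1 ++ [point], st.2.2))
          (segs, cur, f)).2.2 = (f || l.any c) := by
  intro l
  induction l with
  | nil =>
      intro segs cur f
      exact ⟨rfl, by simp⟩
  | cons p ps ih =>
      intro segs cur f
      by_cases h : c p
      · simpa [pvGo, h] using ih (segs ++ [cur ++ [p]]) [p] true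
      · simpa [pvGo, h] using ih segs (cur ++ [p]) f

theorem pvSlice_mid {α : Type} (pre : List α) (p : α) (ps : List α) (start : ℕ)
    (hs : start ≤ pre.length) :
    PySem.List.slice (pre ++ p :: ps) (some (start : Int)) (some ((pre.length : Int) + 1))
      = pre.drop start ++ [p] := by
  have h1 : ((pre.length : Int) + 1) = ((pre.length + 1 : ℕ) : Int) := by push_cast; ring
  rw [h1, PySem.List.slice_natCast]
  rw [List.drop_append_of_le_length hs]
  rw [List.take_append]
  have h2 : pre.length + 1 - start - (pre.drop start).length = 1 := by
    simp [List.length_drop]; omega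
  have h3 : (pre.drop start).length ≤ pre.length + 1 - start := by
    simp [List.length_drop]; omega
  rw [List.take_of_length_le h3, h2]
  simp

theorem pvMain {α : Type} (c : α → Bool) :
    ∀ (suf pre cur : List α) (start : ℕ), start ≤ pre.length → cur = pre.drop start →
      pvSegs (pre ++ suf) (start : Int) (pvIdx c (pre.length : Int) suf) = pvGo c cur suf := by
  intro suf
  induction suf with
  | nil =>
      intro pre cur start hs hcur
      subst hcur
      simp only [pvIdx, pvSegs, List.append_nil, pvGo, PySem.List.slice_from_natCast,
        List.length_drop]
      by_cases hgt : (start : Int) < (pre.length : Int) - 1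
      · rw [if_pos hgt, if_pos (by simp; omega)]
      · rw [if_neg hgt, if_neg (by simp; omega)]
  | cons p ps ih =>
      intro pre cur start hs hcur
      have hpath : pre ++ p :: ps = (pre ++ [p]) ++ ps := by simp
      have hlen : (((pre ++ [p]).length : ℕ) : Int) = (pre.length : Int) + 1 := by
        simp
      by_cases h : c p
      · have e1 : pvGo c cur (p :: ps) = (cur ++ [p]) :: pvGo c [p] ps := by simp [pvGo, h]
        have e2 : pvIdx c (pre.length : Int) (p :: ps)
            = (pre.length : Int) :: pvIdx c ((pre.length : Int) + 1) ps := by simp [pvIdx, h]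
        rw [e1, e2, pvSegs]
        congr 1
        · rw [hcur]; exact pvSlice_mid pre p ps start hs
        · rw [hpath, ← hlen]
          exact ih (pre ++ [p]) [p] pre.length (by simp) (by simp)
      · have e1 : pvGo c cur (p :: ps) = pvGo c (cur ++ [p]) ps := by simp [pvGo, h]
        have e2 : pvIdx c (pre.length : Int) (p :: ps)
            = pvIdx c ((pre.length : Int) + 1) ps := by simp [pvIdx, h]
        rw [e1, e2, hpath, ← hlen]
        exact ih (pre ++ [p]) (cur ++ [p]) start (by simp; omega)
          (by rw [hcur, List.drop_append_of_le_length hs])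

-- ===== VERDICT (by name: the statement is the Claim_ definition above) =====
theorem segment_path_by_actions_py_spec : Claim_equal_segment_path_by_actions_py := by
  intro path _hdom _hpre
  unfold Spec_segment_path_by_actions_py
  unfold segment_path_by_actions_py segment_path_by_actions_py_alt
  simp only []
  rw [pvIdx_fold pvIsAct path 0 []]
  simp only [List.nil_append]
  have hB := pvGo_fold pvIsAct path [] [] false
  have hsplit : ∀ {β : Type} (L : List β) (C : Prop) [Decidable C] (x : β),
      (if C then L ++ [x] else L) = L ++ (if C then [x] else []) := by
    intro β L C _ x; split <;> simp
  by_cases hany : path.any pvIsAct = false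
  · rw [if_pos ((pvIdx_nil_iff pvIsAct path 0).mpr hany)]
    rw [hB.2, hany]
    simp
  · have hT : path.any pvIsAct = true := by
      revert hany; cases path.any pvIsAct <;> simp
    rw [if_neg (fun h => hany ((pvIdx_nil_iff pvIsAct path 0).mp h))]
    rw [hB.2, hT]
    rw [if_neg (by simp : ¬((false || true) = false))]
    rw [hsplit, hsplit, pvSegs_fold path (pvIdx pvIsAct 0 path) [] 0, hB.1]
    have hm := pvMain pvIsAct path [] [] 0 (by simp) (by simp)
    simp only [List.nil_append, Nat.cast_zero, List.length_nil] at hm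
    rw [hm]
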